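-- pv_equiv track=rewrite | github.com/Nit17/ADS | Python_programs_assignment/smaple1/practice_sample_1.py | countCharsDigits
-- ===== SOURCE A (Python) =====
-- def checkDigitORLetter(b):
-- 	if(64<ord(b)<91 or 96<ord(b)<123):
-- 		return True
-- 	else:
-- 		return False
--
-- def countCharsDigits(a):
-- 	c=0
-- 	d=0
-- 	for i in range(len(a)):
-- 		if(checkDigitORLetter(a[i])):
-- 			c+=1
-- 		else:
-- 			d+=1
-- 	return c,d
--
-- a=[]
-- ===== SOURCE B (Python) =====
-- def countCharsDigits(a):
--     freq = {}
--     for ch in a: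
--         freq[ch] = freq.get(ch, 0) + 1
--     c = 0
--     for k in range(65, 91):
--         c += freq.get(chr(k), 0) + freq.get(chr(k + 32), 0)
--     return c, len(a) - c
-- ===== Notes on version B (the rewrite author's own statement) =====
-- stated objective: alternative
-- what changed: Instead of classifying each character with a per-character ord-range helper call inside the loop, B builds a character-frequency dict in one branch-free pass and then sums the histogram entries over the 26 upper- and 26 lower-case letter codes; the non-letter count is len(a) minus that sum.
import Mathlib
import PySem

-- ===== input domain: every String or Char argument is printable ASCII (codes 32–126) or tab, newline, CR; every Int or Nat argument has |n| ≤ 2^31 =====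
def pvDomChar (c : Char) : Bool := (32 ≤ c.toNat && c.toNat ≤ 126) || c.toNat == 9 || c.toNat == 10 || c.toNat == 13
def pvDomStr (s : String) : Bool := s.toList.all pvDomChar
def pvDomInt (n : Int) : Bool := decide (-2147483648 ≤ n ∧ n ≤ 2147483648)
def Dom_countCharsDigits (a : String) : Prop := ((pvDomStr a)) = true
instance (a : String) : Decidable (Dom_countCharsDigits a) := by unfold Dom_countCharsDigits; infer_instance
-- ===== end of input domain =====

-- B replaces the per-character classify-and-branch loop by a character histogram (dict built in one
-- branch-free pass) whose entries are then summed over the 52 letter codes; objective: alternative.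

-- ===== PORT A =====
def checkDigitORLetter (b : Char) : Bool :=
  if (64 < b.toNat && b.toNat < 91) || (96 < b.toNat && b.toNat < 123) then true else false

-- A iterates i in range(len(a)) reading a[i]; ported as a left fold over the characters in order,
-- keeping both counters c and d with the same if/else.
def countCharsDigits (a : String) : Int × Int :=
  a.toList.foldl (fun (s : Int × Int) ch =>
    if checkDigitORLetter ch then (s.1 + 1, s.2) else (s.1, s.2 + 1)) (0, 0)

-- ===== PORT B =====
-- B: freq[ch] = freq.get(ch,0)+1 over the string, then c = sum over k in range(65,91) of
-- freq.get(chr(k),0) + freq.get(chr(k+32),0), and d = len(a) - c.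
def countCharsDigits_alt (a : String) : Int × Int :=
  let freq : PySem.Dict Char Int :=
    a.toList.foldl (fun d ch => d.insert ch (d.getD ch 0 + 1)) PySem.Dict.empty
  let c : Int := (PySem.List.pyRange 65 91).foldl
    (fun acc k => acc + (freq.getD (Char.ofNat k.toNat) 0 + freq.getD (Char.ofNat (k + 32).toNat) 0)) 0
  (c, PySem.Str.len a - c)

-- ===== PRECONDITION & SPEC =====
def Spec_countCharsDigits (a : String) (out : Int × Int) : Prop := out = countCharsDigits_alt a
instance (a : String) (out : Int × Int) : Decidable (Spec_countCharsDigits a out) := by unfold Spec_countCharsDigits; infer_instance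

-- ===== CLAIM (what is proved, stated in full; the proofs are below) =====
def Claim_equal_countCharsDigits : Prop := ∀ (a : String), Dom_countCharsDigits a → Spec_countCharsDigits a (countCharsDigits a)

-- ===== LEMMAS AND PROOFS =====

theorem pvShift (p : Char → Bool) (l : List Char) (x : Int) :
    l.foldl (fun acc ch => if p ch then acc + 1 else acc) x
    = x + l.foldl (fun acc ch => if p ch then acc + 1 else acc) 0 := by
  induction l generalizing x with
  | nil => simp
  | cons h t ih =>
    simp only [List.foldl_cons]
    rw [ih, ih (if p h then (0:Int) + 1 else 0)]
    split <;> ring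

theorem pvFold_eq (p : Char → Bool) (l : List Char) (c d : Int) :
    l.foldl (fun (s : Int × Int) ch =>
      if p ch then (s.1 + 1, s.2) else (s.1, s.2 + 1)) (c, d)
    = (c + l.foldl (fun acc ch => if p ch then acc + 1 else acc) 0,
       d + ((l.length : Int) - l.foldl (fun acc ch => if p ch then acc + 1 else acc) 0)) := by
  induction l generalizing c d with
  | nil => simp
  | cons h t ih =>
    simp only [List.foldl_cons, List.length_cons]
    rw [pvShift p t (if p h then (0:Int) + 1 else 0)]
    split
    · rw [ih]; simp only [Prod.mk.injEq]; constructor <;> push_cast <;> ring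
    · rw [ih]; simp only [Prod.mk.injEq]; constructor <;> push_cast <;> ring

-- letter-count accumulator = countP
theorem pvLC (l : List Char) :
    l.foldl (fun acc ch => if checkDigitORLetter ch then acc + 1 else acc) 0
    = ((l.countP checkDigitORLetter : Nat) : Int) := by
  have h : (fun (acc : Int) ch => if checkDigitORLetter ch then acc + 1 else acc)
      = fun acc ch => acc + (if checkDigitORLetter ch then 1 else 0) := by
    funext acc ch; split <;> simp
  rw [h, PySem.List.foldl_add, ← PySem.List.sum_map_ite_one_zero checkDigitORLetter l]
  simp

-- sum of an equality indicator over range(a,b) is an interval test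
theorem pvIndSum (n a b : Int) :
    ((PySem.List.pyRange a b).map (fun k => if n = k then (1:Int) else 0)).sum
    = if a ≤ n ∧ n < b then 1 else 0 := by
  by_cases hab : a ≤ b
  · obtain ⟨m, rfl⟩ : ∃ m : Nat, b = a + m := ⟨(b - a).toNat, by omega⟩
    clear hab
    induction m with
    | zero =>
      rw [PySem.List.pyRange_one_eq_nil (by omega)]
      simp only [List.map_nil, List.sum_nil]
      rw [if_neg (by push_cast; omega)]
    | succ k ih =>
      have hb : a + ((k+1 : Nat) : Int) = (a + k) + 1 := by push_cast; ring
      rw [hb, PySem.List.pyRange_one_succ_right (by push_cast; omega)]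
      simp only [List.map_append, List.sum_append, ih]
      simp only [List.map_cons, List.map_nil, List.sum_cons, List.sum_nil]
      split_ifs <;> omega
  · rw [PySem.List.pyRange_one_eq_nil (by omega)]
    simp; omega

-- chr(m) = h  ↔  ord(h) = m, for valid codepoints m
theorem pvChrEq (m : Nat) (hm : m < 55296) (h : Char) :
    (Char.ofNat m = h) ↔ (h.toNat = m) := by
  constructor
  · intro e
    have h2 := congrArg Char.toNat e
    rw [Char.toNat_ofNat, if_pos (Or.inl hm)] at h2
    omega
  · intro e
    have : Char.ofNat m = Char.ofNat h.toNat := by rw [e]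
    rw [this, Char.ofNat_toNat]

-- per-character contribution of the letter-code sweep
theorem pvOne (h : Char) :
    ((PySem.List.pyRange 65 91).map (fun k =>
      (if Char.ofNat k.toNat = h then (1:Int) else 0) +
      (if Char.ofNat (k + 32).toNat = h then (1:Int) else 0))).sum
    = if checkDigitORLetter h then 1 else 0 := by
  rw [PySem.List.sum_map_add_int]
  have h1 : ((PySem.List.pyRange 65 91).map (fun k => if Char.ofNat k.toNat = h then (1:Int) else 0))
      = (PySem.List.pyRange 65 91).map (fun k => if ((h.toNat : Int)) = k then (1:Int) else 0) := by
    apply List.map_congr_left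
    intro k hk
    rw [PySem.List.mem_pyRange_one] at hk
    have hval : k.toNat < 55296 := by omega
    by_cases e : Char.ofNat k.toNat = h
    · rw [if_pos e, if_pos (by have := (pvChrEq _ hval h).mp e; omega)]
    · rw [if_neg e, if_neg (by intro hc; exact e ((pvChrEq _ hval h).mpr (by omega)))]
  have h2 : ((PySem.List.pyRange 65 91).map (fun k => if Char.ofNat (k + 32).toNat = h then (1:Int) else 0))
      = (PySem.List.pyRange 65 91).map (fun k => if ((h.toNat : Int) - 32) = k then (1:Int) else 0) := by
    apply List.map_congr_left
    intro k hk
    rw [PySem.List.mem_pyRange_one] at hk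
    have hval : (k + 32).toNat < 55296 := by omega
    by_cases e : Char.ofNat (k + 32).toNat = h
    · rw [if_pos e, if_pos (by have := (pvChrEq _ hval h).mp e; omega)]
    · rw [if_neg e, if_neg (by intro hc; exact e ((pvChrEq _ hval h).mpr (by omega)))]
  rw [h1, h2, pvIndSum, pvIndSum]
  unfold checkDigitORLetter
  split_ifs <;> simp_all <;> omega

-- the histogram sweep counts exactly the letters
theorem pvMain (l : List Char) :
    ((PySem.List.pyRange 65 91).map (fun k =>
      ((l.count (Char.ofNat k.toNat) : Nat) : Int) + ((l.count (Char.ofNat (k + 32).toNat) : Nat) : Int))).sum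
    = ((l.countP checkDigitORLetter : Nat) : Int) := by
  induction l with
  | nil => simp
  | cons h t ih =>
    have hc : ∀ x : Char, (((h :: t).count x : Nat) : Int)
        = ((t.count x : Nat) : Int) + (if x = h then (1:Int) else 0) := by
      intro x
      rw [List.count_cons]
      by_cases e : x = h
      · have hb : (h == x) = true := by simp [e]
        rw [if_pos e, if_pos hb]; push_cast; ring
      · have hb : (h == x) = false := by simp; exact fun c => e c.symm
        rw [if_neg e, hb]; simp
    have hmap : ((PySem.List.pyRange 65 91).map (fun k =>
        (((h :: t).count (Char.ofNat k.toNat) : Nat) : Int) + (((h :: t).count (Char.ofNat (k + 32).toNat) : Nat) : Int)))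
        = (PySem.List.pyRange 65 91).map (fun k =>
          (((t.count (Char.ofNat k.toNat) : Nat) : Int) + ((t.count (Char.ofNat (k + 32).toNat) : Nat) : Int)) +
          ((if Char.ofNat k.toNat = h then (1:Int) else 0) + (if Char.ofNat (k + 32).toNat = h then (1:Int) else 0))) := by
      apply List.map_congr_left
      intro k _
      rw [hc, hc]; ring
    rw [hmap, PySem.List.sum_map_add_int, ih, pvOne, List.countP_cons]
    split_ifs <;> simp_all

-- ===== VERDICT (by name: the statement is the Claim_ definition above) =====
theorem countCharsDigits_spec : Claim_equal_countCharsDigits := by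
  intro a _
  unfold Spec_countCharsDigits countCharsDigits countCharsDigits_alt
  rw [pvFold_eq checkDigitORLetter, pvLC]
  simp only [PySem.Dict.foldl_insert_getD_add_one_eq_counter, PySem.Dict.getD_counter,
    PySem.List.foldl_add, PySem.Str.len_eq]
  rw [pvMain]
  refine Prod.ext rfl ?_
  show (0:Int) + _ = _
  ring
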